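-- pv_equiv track=rewrite | github.com/cb-090/parking-functions-project | parkingfuncfinal.py | is_classical_parking_function
-- ===== SOURCE A (Python) =====
-- def is_classical_parking_function(sequence):
--     n = len(sequence)
--
--     # Optional sanity check (since classical definition assumes values in 1..n)
--     if any(x < 1 or x > n for x in sequence):
--         return False
--
--     seq = sorted(sequence)
--
--     for i, val in enumerate(seq, start=1):  # i = 1..n
--         if val > i:
--             return False
--
--     return True
-- ===== SOURCE B (Python) =====
-- def is_classical_parking_function(sequence):
--     n = len(sequence)
--     counts = [0] * (n + 1)
--     for x in sequence:
--         if x < 1 or x > n: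
--             return False
--         counts[x] += 1
--     total = 0
--     for i in range(1, n + 1):
--         total += counts[i]
--         if total < i:
--             return False
--     return True
-- ===== Notes on version B (the rewrite author's own statement) =====
-- stated objective: alternative
-- what changed: Replaces sort-then-scan with a bucket count of each value 1..n and a single prefix-sum pass checking that at least i cars prefer a spot <= i; asymptotically O(n) vs O(n log n) but not measurably faster in CPython, where the built-in sort runs at C speed.
import Mathlib
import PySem

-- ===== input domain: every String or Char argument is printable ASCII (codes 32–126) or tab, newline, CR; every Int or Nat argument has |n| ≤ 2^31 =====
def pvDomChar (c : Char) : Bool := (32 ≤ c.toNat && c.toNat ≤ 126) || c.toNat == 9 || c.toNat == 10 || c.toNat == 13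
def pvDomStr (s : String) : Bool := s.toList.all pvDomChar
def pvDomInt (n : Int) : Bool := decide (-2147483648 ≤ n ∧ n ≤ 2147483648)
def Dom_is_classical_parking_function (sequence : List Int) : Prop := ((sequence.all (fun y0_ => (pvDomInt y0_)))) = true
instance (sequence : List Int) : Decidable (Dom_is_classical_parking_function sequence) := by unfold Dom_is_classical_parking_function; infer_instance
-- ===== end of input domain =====

-- B replaces A's sort-then-scan by bucket counts of the values 1..n and one prefix-sum pass (a different algorithm of similar measured cost).

-- ===== PORT A =====
-- the enumerate(seq, start=1) loop with its early return
def pvChkA : List Int → Int → Bool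
  | [], _ => true
  | v :: rest, i => if v > i then false else pvChkA rest (i + 1)

def is_classical_parking_function (sequence : List Int) : Bool :=
  let n : Int := sequence.length
  if sequence.any (fun x => decide (x < 1) || decide (x > n)) then false
  else pvChkA (PySem.List.sorted sequence (fun x => x) false) 1

-- ===== PORT B =====
-- the first loop of Source B: range-check each x and do counts[x] += 1 (None = the early `return False`)
def pvFill (n : Int) : List Int → List Int → Option (List Int)
  | [], counts => some counts
  | x :: rest, counts =>
      if x < 1 || x > n then none
      else pvFill n rest (counts.set x.toNat (counts.getD x.toNat 0 + 1))

-- the second loop of Source B: running prefix sum `total`, checked against i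
def pvPrefix : List Int → Int → Int → Bool
  | [], _, _ => true
  | c :: rest, i, total =>
      if total + c < i then false else pvPrefix rest (i + 1) (total + c)

def is_classical_parking_function_alt (sequence : List Int) : Bool :=
  let n := sequence.length
  match pvFill (n : Int) sequence (List.replicate (n + 1) 0) with
  | none => false
  | some counts => pvPrefix (counts.drop 1) 1 0

-- ===== PRECONDITION & SPEC =====
def Spec_is_classical_parking_function (sequence : List Int) (out : Bool) : Prop := out = is_classical_parking_function_alt sequence
instance (sequence : List Int) (out : Bool) : Decidable (Spec_is_classical_parking_function sequence out) := by unfold Spec_is_classical_parking_function; infer_instance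

-- ===== CLAIM (what is proved, stated in full; the proofs are below) =====
def Claim_equal_is_classical_parking_function : Prop := ∀ (sequence : List Int), Dom_is_classical_parking_function sequence → Spec_is_classical_parking_function sequence (is_classical_parking_function sequence)

-- ===== LEMMAS AND PROOFS =====

-- A's loop returns true iff every element of l is at most its 1-based position offset by i
theorem pvChkA_iff (l : List Int) (i : Int) :
    pvChkA l i = true ↔ ∀ k (hk : k < l.length), l[k] ≤ i + (k : Int) := by
  induction l generalizing i with
  | nil => simp [pvChkA]
  | cons v rest ih =>
    simp only [pvChkA]
    split_ifs with hv
    · constructor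
      · intro h; cases h
      · intro h
        have := h 0 (by simp)
        simp at this; omega
    · rw [ih]
      constructor
      · intro h k hk
        cases k with
        | zero => simpa using (by omega : v ≤ i + 0)
        | succ k' =>
          have := h k' (by simpa using Nat.lt_of_succ_lt_succ hk)
          simpa [add_assoc, add_comm, add_left_comm] using by omega
      · intro h k hk
        have := h (k+1) (by simpa using Nat.succ_lt_succ hk)
        simp at this; omega

theorem pvFill_none (n : Int) (seq : List Int) (counts : List Int)
    (h : ∃ x ∈ seq, x < 1 ∨ n < x) : pvFill n seq counts = none := by
  induction seq generalizing counts with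
  | nil => simp at h
  | cons x rest ih =>
    simp only [pvFill]
    rcases h with ⟨y, hy, hout⟩
    rcases List.mem_cons.mp hy with rfl | hmem
    · rw [if_pos]; simp; omega
    · split_ifs with hx
      · rfl
      · exact ih _ ⟨y, hmem, hout⟩

theorem pvFill_some (n : Int) (seq : List Int) : ∀ (counts : List Int),
    n.toNat < counts.length →
    (∀ x ∈ seq, 1 ≤ x ∧ x ≤ n) →
    ∃ counts', pvFill n seq counts = some counts' ∧ counts'.length = counts.length ∧
      ∀ j : Nat, counts'.getD j 0 = counts.getD j 0 + seq.count ((j : Int)) := by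
  induction seq with
  | nil => intro counts _ _; exact ⟨counts, rfl, rfl, by simp⟩
  | cons x rest ih =>
    intro counts hn hx
    have hx0 := hx x (by simp)
    simp only [pvFill]
    rw [if_neg (by simp; omega)]
    have hxlt : x.toNat < counts.length := by omega
    obtain ⟨c', hc', hlen, hval⟩ := ih (counts.set x.toNat (counts.getD x.toNat 0 + 1))
      (by simpa using hn) (fun y hy => hx y (by simp [hy]))
    refine ⟨c', hc', by simpa using hlen, fun j => ?_⟩
    rw [hval j]
    by_cases hj : j = x.toNat
    · subst hj
      rw [List.getD_eq_getElem _ _ (by simpa using hxlt), List.getElem_set_self (by simpa using hxlt)]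
      rw [List.getD_eq_getElem _ _ hxlt]
      have : (x.toNat : Int) = x := by omega
      simp [this]
      omega
    · have hne : ((j : Int)) ≠ x := by omega
      have hset : (counts.set x.toNat (counts.getD x.toNat 0 + 1)).getD j 0 = counts.getD j 0 := by
        by_cases hjl : j < counts.length
        · rw [List.getD_eq_getElem _ _ (by simpa using hjl), List.getElem_set_ne (by omega),
            List.getD_eq_getElem _ _ hjl]
        · rw [List.getD_eq_default _ _ (by simpa using Nat.le_of_not_lt hjl),
            List.getD_eq_default _ _ (by simpa using Nat.le_of_not_lt hjl)]
      rw [hset, List.count_cons]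
      simp [hne.symm]

theorem pvPrefix_iff (cs : List Int) : ∀ (i t : Int),
    pvPrefix cs i t = true ↔ ∀ m (_ : m < cs.length), i + (m : Int) ≤ t + ((cs.take (m+1)).sum) := by
  induction cs with
  | nil => intro i t; simp [pvPrefix]
  | cons c rest ih =>
    intro i t
    simp only [pvPrefix]
    split_ifs with hc
    · constructor
      · intro h; cases h
      · intro h
        have := h 0 (by simp)
        simp at this; omega
    · rw [ih]
      constructor
      · intro h m hm
        cases m with
        | zero => simp; omega
        | succ m' =>
          have := h m' (by simpa using Nat.lt_of_succ_lt_succ hm)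
          simp [List.take_succ_cons] at this ⊢
          omega
      · intro h m hm
        have := h (m+1) (by simpa using Nat.succ_lt_succ hm)
        simp [List.take_succ_cons] at this ⊢
        omega

theorem countP_le_succ (seq : List Int) (k : Int) :
    seq.countP (fun x => decide (x ≤ k + 1)) =
      seq.countP (fun x => decide (x ≤ k)) + seq.count (k+1) := by
  induction seq with
  | nil => simp
  | cons x rest ih =>
    simp only [List.countP_cons, List.count_cons, ih, decide_eq_true_eq, beq_iff_eq]
    split_ifs <;> omega


theorem bucket_sum (seq : List Int) (n : Nat) (counts' : List Int)
    (hlen : counts'.length = n + 1)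
    (hval : ∀ j : Nat, counts'.getD j 0 = seq.count ((j : Int)))
    (hx : ∀ x ∈ seq, 1 ≤ x) :
    ∀ k, k ≤ n → ((counts'.drop 1).take k).sum =
      (seq.countP (fun x => decide (x ≤ (k : Int))) : Int) := by
  intro k
  induction k with
  | zero =>
    intro _
    have : seq.countP (fun x => decide (x ≤ (0:Int))) = 0 := by
      rw [List.countP_eq_zero]
      intro x hxm
      simpa using by have := hx x hxm; omega
    simp [this]
  | succ k ih =>
    intro hk
    have hk' : k ≤ n := by omega
    have hcs : (counts'.drop 1).length = n := by simp [hlen]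
    have hklt : k < (counts'.drop 1).length := by omega
    rw [List.take_add_one, List.sum_append, ih hk']
    have hget : (counts'.drop 1)[k]? = some ((counts'.drop 1)[k]'hklt) :=
      List.getElem?_eq_getElem hklt
    have hgetv : (counts'.drop 1)[k]'hklt = seq.count (((k+1 : Nat) : Int)) := by
      have h1 : (counts'.drop 1)[k]'hklt = counts'[1 + k]'(by omega) := List.getElem_drop
      have h2 : counts'.getD (1 + k) 0 = counts'[1 + k]'(by omega) :=
        List.getD_eq_getElem _ _ (by omega)
      rw [h1, ← h2, hval (1 + k)]
      norm_num [Nat.add_comm]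
    rw [hget]
    simp only [Option.toList_some, List.sum_cons, List.sum_nil, add_zero, hgetv]
    have hsucc := countP_le_succ seq (k : Int)
    have hcast : ((k+1 : Nat) : Int) = (k : Int) + 1 := by push_cast; ring
    rw [hcast, hsucc]
    push_cast
    ring

theorem sorted_chk_iff (l : List Int) (hpair : l.Pairwise (· ≤ ·)) :
    (∀ k (hk : k < l.length), l[k] ≤ 1 + (k : Int)) ↔
    (∀ m, m < l.length → ((m : Int) + 1 ≤ (l.countP (fun x => decide (x ≤ (m : Int) + 1)) : Int))) := by
  constructor
  · intro h m hm
    have htake : (l.take (m+1)).countP (fun x => decide (x ≤ (m : Int) + 1)) = (l.take (m+1)).length := by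
      rw [List.countP_eq_length]
      intro x hxm
      obtain ⟨j, hj, hx⟩ := List.mem_iff_getElem.mp hxm
      have hjl : j < l.length := lt_of_lt_of_le hj (by simp)
      have hjm : j < m + 1 := lt_of_lt_of_le hj (by simp)
      have := h j hjl
      rw [List.getElem_take] at hx
      subst hx
      simp only [decide_eq_true_eq]
      have : (j : Int) ≤ (m : Int) := by exact_mod_cast Nat.lt_succ_iff.mp hjm
      omega
    have hlen : (l.take (m+1)).length = m + 1 := by
      simp [Nat.succ_le_of_lt hm]
    have hsplit : l.countP (fun x => decide (x ≤ (m : Int) + 1)) =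
        (l.take (m+1)).countP (fun x => decide (x ≤ (m : Int) + 1)) +
        (l.drop (m+1)).countP (fun x => decide (x ≤ (m : Int) + 1)) := by
      rw [← List.countP_append, List.take_append_drop]
    rw [hsplit, htake, hlen]
    push_cast
    omega
  · intro h k hk
    by_contra hgt
    simp only [not_le] at hgt
    have hdrop : (l.drop k).countP (fun x => decide (x ≤ (k : Int) + 1)) = 0 := by
      rw [List.countP_eq_zero]
      intro x hxm
      obtain ⟨j, hj, hx⟩ := List.mem_iff_getElem.mp hxm
      rw [List.getElem_drop] at hx
      have hkj : k + j < l.length := by simp at hj; omega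
      have hle : l[k] ≤ l[k + j]'hkj := by
        rcases Nat.eq_zero_or_pos j with rfl | hpos
        · simp
        · exact (List.pairwise_iff_getElem.mp hpair) k (k + j) hk hkj (by omega)
      subst hx
      simp only [decide_eq_true_eq, not_le]
      omega
    have hsplit : l.countP (fun x => decide (x ≤ (k : Int) + 1)) =
        (l.take k).countP (fun x => decide (x ≤ (k : Int) + 1)) +
        (l.drop k).countP (fun x => decide (x ≤ (k : Int) + 1)) := by
      rw [← List.countP_append, List.take_append_drop]
    have htk : (l.take k).countP (fun x => decide (x ≤ (k : Int) + 1)) ≤ k :=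
      le_trans List.countP_le_length (by rw [List.length_take]; omega)
    have := h k hk
    rw [hsplit, hdrop] at this
    push_cast at this
    omega

theorem pv_main (sequence : List Int) :
    is_classical_parking_function sequence = is_classical_parking_function_alt sequence := by
  by_cases hR : ∀ x ∈ sequence, 1 ≤ x ∧ x ≤ (sequence.length : Int)
  · -- range check passes in both
    have hany : sequence.any (fun x => decide (x < 1) || decide (x > (sequence.length : Int))) = false := by
      rw [List.any_eq_false]
      intro x hxm
      have := hR x hxm
      intro hcontr
      simp only [Bool.or_eq_true, decide_eq_true_eq] at hcontr
      omega
    obtain ⟨counts', hc', hlen, hval⟩ :=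
      pvFill_some (sequence.length : Int) sequence (List.replicate (sequence.length + 1) 0)
        (by simp) (fun x hxm => hR x hxm)
    have hval' : ∀ j : Nat, counts'.getD j 0 = sequence.count ((j : Int)) := by
      intro j
      rw [hval j]
      rcases Nat.lt_or_ge j (sequence.length + 1) with hj | hj
      · rw [List.getD_eq_getElem _ _ (by simpa using hj)]
        simp
      · rw [List.getD_eq_default _ _ (by simpa using hj)]
        simp
    have hlen' : counts'.length = sequence.length + 1 := by simpa using hlen
    simp only [is_classical_parking_function, is_classical_parking_function_alt, hany, hc',
      Bool.false_eq_true, if_false]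
    -- both sides as booleans
    have hiff : (pvChkA (PySem.List.sorted sequence (fun x => x) false) 1 = true) ↔
        (pvPrefix (counts'.drop 1) 1 0 = true) := by
      rw [pvChkA_iff, pvPrefix_iff]
      have hperm : (PySem.List.sorted sequence (fun x => x) false).Perm sequence :=
        PySem.List.sorted_perm _ _ _
      have hpair : (PySem.List.sorted sequence (fun x => x) false).Pairwise (· ≤ ·) := by
        have := PySem.List.sorted_pairwise sequence (fun x => x)
        simpa using this
      have hslen : (PySem.List.sorted sequence (fun x => x) false).length = sequence.length :=
        hperm.length_eq
      have hcslen : (counts'.drop 1).length = sequence.length := by simp [hlen']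
      rw [show (∀ k (hk : k < (PySem.List.sorted sequence (fun x => x) false).length),
            (PySem.List.sorted sequence (fun x => x) false)[k] ≤ 1 + (k : Int)) ↔ _ from
          sorted_chk_iff _ hpair]
      constructor
      · intro h m hm
        rw [hcslen] at hm
        have := h m (by omega)
        rw [hperm.countP_eq] at this
        rw [bucket_sum sequence sequence.length counts' hlen' hval'
          (fun x hxm => (hR x hxm).1) (m+1) (by omega)]
        have hcast : ((m + 1 : Nat) : Int) = (m : Int) + 1 := by push_cast; ring
        rw [hcast]
        omega
      · intro h m hm
        rw [hslen] at hm
        have := h m (by omega)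
        rw [bucket_sum sequence sequence.length counts' hlen' hval'
          (fun x hxm => (hR x hxm).1) (m+1) (by omega)] at this
        have hcast : ((m + 1 : Nat) : Int) = (m : Int) + 1 := by push_cast; ring
        rw [hcast] at this
        rw [hperm.countP_eq]
        omega
    cases h1 : pvChkA (PySem.List.sorted sequence (fun x => x) false) 1 <;>
      cases h2 : pvPrefix (counts'.drop 1) 1 0 <;> simp_all
  · -- some element out of range: both return false
    simp only [not_forall, not_and, not_le] at hR
    obtain ⟨x, hxm, hxo⟩ := hR
    have hout : x < 1 ∨ (sequence.length : Int) < x := by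
      by_cases h1 : 1 ≤ x
      · right; exact hxo h1
      · left; omega
    have hany : sequence.any (fun x => decide (x < 1) || decide (x > (sequence.length : Int))) = true := by
      refine List.any_eq_true.mpr ⟨x, hxm, ?_⟩
      rcases hout with h | h <;> simp [h]
    have hfill := pvFill_none (sequence.length : Int) sequence
      (List.replicate (sequence.length + 1) 0) ⟨x, hxm, hout⟩
    simp only [is_classical_parking_function, is_classical_parking_function_alt, hany, hfill, if_true]


-- ===== VERDICT (by name: the statement is the Claim_ definition above) =====
theorem is_classical_parking_function_spec : Claim_equal_is_classical_parking_function := by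
  intro sequence _
  unfold Spec_is_classical_parking_function
  exact pv_main sequence
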